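-- pv_equiv track=rewrite | github.com/kingbaudouinfoundation/CompaniesData | app.py | build_data_employees
-- ===== SOURCE A (Python) =====
-- def build_data_employees(tab):
--     count_empl = 0
--     tab_emp = []
--     for e in tab:
--         if e is not None:
--             e = e.replace(' trav.', '')
--             e = e.split(' &agrave; ')
--             tab_emp.append(e)
--             count_empl = count_empl + 1
--
--     empl = ['1 to 5', '5 to 10', '10 to 20', '20 to 50', '50 to 100', '100 to 500', '500 to 1000', 'More than 1000']
--     P1 = P2 = P3 = P4 = P5 = P6 = P7 = P8 = 0
--     prop_empl = []
--
--     for row in tab_emp: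
--         if len(row) == 2:
--             diff = int(row[1]) - int(row[0])
--             if diff <= 5:
--                 P1 = P1 + 1
--             elif diff >= 5 and diff <= 10:
--                 P2 = P2 + 1
--             elif diff >= 10 and diff <= 20:
--                 P3 = P3 + 1
--             elif diff >= 20 and diff <= 50:
--                 P4 = P4 + 1
--             elif diff >= 50 and diff <= 100:
--                 P5 = P5 + 1
--             elif diff>= 100 and diff <= 500:
--                 P6 = P6 + 1
--             elif diff >= 500 and diff <= 1000:
--                 P7 = P7 + 1
--         elif len(row) == 1 and row[0] is not None:
--             P8 = P8 + 1
--
--     prop_empl.append(P1)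
--     prop_empl.append(P2)
--     prop_empl.append(P3)
--     prop_empl.append(P4)
--     prop_empl.append(P5)
--     prop_empl.append(P6)
--     prop_empl.append(P7)
--     prop_empl.append(P8)
--
--     return empl, prop_empl, count_empl
-- ===== SOURCE B (Python) =====
-- def build_data_employees(tab):
--     empl = ['1 to 5', '5 to 10', '10 to 20', '20 to 50', '50 to 100', '100 to 500', '500 to 1000', 'More than 1000']
--     bounds = [5, 10, 20, 50, 100, 500, 1000]
--     prop_empl = [0] * 8
--     count_empl = 0
--     for e in tab:
--         if e is None:
--             continue
--         parts = e.replace(' trav.', '').split(' &agrave; ')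
--         count_empl += 1
--         if len(parts) == 2:
--             diff = int(parts[1]) - int(parts[0])
--             idx = sum(1 for b in bounds if b < diff)
--             if idx < 7:
--                 prop_empl[idx] += 1
--         elif len(parts) == 1:
--             prop_empl[7] += 1
--     return empl, prop_empl, count_empl
-- ===== Notes on version B (the rewrite author's own statement) =====
-- stated objective: simpler
-- what changed: Replaced A's two passes (filter/parse pass building tab_emp, then an 8-counter elif cascade over it) by a single pass that counts each row directly into a bucket list, with the cascade replaced by a boundary table [5,10,20,50,100,500,1000] and idx = number of bounds below diff (diff>1000 gives idx 7 and stays uncounted, matching A's missing final else).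
import Mathlib
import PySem

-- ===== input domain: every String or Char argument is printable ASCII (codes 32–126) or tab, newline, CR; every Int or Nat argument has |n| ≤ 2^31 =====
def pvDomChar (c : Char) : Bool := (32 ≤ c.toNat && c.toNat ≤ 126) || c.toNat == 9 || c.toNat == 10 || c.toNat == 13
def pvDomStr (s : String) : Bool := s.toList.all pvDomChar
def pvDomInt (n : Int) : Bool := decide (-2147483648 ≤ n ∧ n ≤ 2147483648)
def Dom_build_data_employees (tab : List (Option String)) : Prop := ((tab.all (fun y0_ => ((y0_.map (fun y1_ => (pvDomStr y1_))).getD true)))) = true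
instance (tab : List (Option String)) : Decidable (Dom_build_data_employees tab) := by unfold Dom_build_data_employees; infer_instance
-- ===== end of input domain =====

-- B replaces A's two passes and 8-way elif cascade by one pass with a boundary table; objective: simpler (same O(n) cost).

-- shared row preprocessing: e.replace(' trav.', '').split(' &agrave; ')  (identical expression in both Pythons; split? is some since sep ≠ "")
def pvParts (s : String) : List String :=
  (PySem.Str.split? (PySem.Str.replace s " trav." "") " &agrave; ").getD []

-- ===== PORT A =====
def pvLabels : List String := ["1 to 5", "5 to 10", "10 to 20", "20 to 50", "50 to 100", "100 to 500", "500 to 1000", "More than 1000"]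

structure PVCnt where
  p1 : Int
  p2 : Int
  p3 : Int
  p4 : Int
  p5 : Int
  p6 : Int
  p7 : Int
  p8 : Int
deriving Repr, DecidableEq

-- first loop of A: filter out None, preprocess, count
def pvStepA (st : List (List String) × Int) (e : Option String) : List (List String) × Int :=
  match e with
  | none => st
  | some s => (st.1 ++ [pvParts s], st.2 + 1)

-- second loop of A: the elif cascade over the 8 counters.
-- int(row[i]) is PySem.Int.ofStr?; it is none exactly where Python raises ValueError, which Pre_ excludes, so .getD 0 is never taken under Pre_.
def pvStep2 (P : PVCnt) (row : List String) : PVCnt :=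
  if row.length = 2 then
    let diff := (PySem.Int.ofStr? (row.getD 1 "")).getD 0 - (PySem.Int.ofStr? (row.getD 0 "")).getD 0
    if diff ≤ 5 then { P with p1 := P.p1 + 1 }
    else if 5 ≤ diff ∧ diff ≤ 10 then { P with p2 := P.p2 + 1 }
    else if 10 ≤ diff ∧ diff ≤ 20 then { P with p3 := P.p3 + 1 }
    else if 20 ≤ diff ∧ diff ≤ 50 then { P with p4 := P.p4 + 1 }
    else if 50 ≤ diff ∧ diff ≤ 100 then { P with p5 := P.p5 + 1 }
    else if 100 ≤ diff ∧ diff ≤ 500 then { P with p6 := P.p6 + 1 }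
    else if 500 ≤ diff ∧ diff ≤ 1000 then { P with p7 := P.p7 + 1 }
    else P
  else if row.length = 1 then { P with p8 := P.p8 + 1 }  -- row[0] is a String here, so Python's 'row[0] is not None' is always true
  else P

def build_data_employees (tab : List (Option String)) : List String × List Int × Int :=
  let st := tab.foldl pvStepA ([], 0)
  let P := st.1.foldl pvStep2 ⟨0, 0, 0, 0, 0, 0, 0, 0⟩
  (pvLabels, [P.p1, P.p2, P.p3, P.p4, P.p5, P.p6, P.p7, P.p8], st.2)

-- ===== PORT B =====
def pvBounds : List Int := [5, 10, 20, 50, 100, 500, 1000]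

-- prop_empl[idx] += 1
def pvIncAt : List Int → Nat → List Int
  | [], _ => []
  | x :: xs, 0 => (x + 1) :: xs
  | x :: xs, n + 1 => x :: pvIncAt xs n

def pvStepB (st : List Int × Int) (e : Option String) : List Int × Int :=
  match e with
  | none => st
  | some s =>
    let parts := pvParts s
    let cnt := st.2 + 1
    if parts.length = 2 then
      let diff := (PySem.Int.ofStr? (parts.getD 1 "")).getD 0 - (PySem.Int.ofStr? (parts.getD 0 "")).getD 0
      let idx := pvBounds.foldl (fun a b => if b < diff then a + 1 else a) 0
      if idx < 7 then (pvIncAt st.1 idx, cnt) else (st.1, cnt)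
    else if parts.length = 1 then (pvIncAt st.1 7, cnt)
    else (st.1, cnt)

def build_data_employees_alt (tab : List (Option String)) : List String × List Int × Int :=
  let st := tab.foldl pvStepB ([0, 0, 0, 0, 0, 0, 0, 0], 0)
  (pvLabels, st.1, st.2)

-- ===== PRECONDITION & SPEC =====
-- Pre_ excludes exactly the inputs where Python A raises ValueError: a non-None entry whose
-- preprocessed form splits into exactly two parts of which one is not int()-parsable.
def Pre_build_data_employees (tab : List (Option String)) : Prop :=
  ∀ e ∈ tab, ∀ s, e = some s → (pvParts s).length = 2 →
    (PySem.Int.ofStr? ((pvParts s).getD 0 "")).isSome = true ∧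
    (PySem.Int.ofStr? ((pvParts s).getD 1 "")).isSome = true
instance (tab : List (Option String)) : Decidable (Pre_build_data_employees tab) := by unfold Pre_build_data_employees; infer_instance

def pvWitness_build_data_employees : List (Option String) :=
  [some "1 &agrave; 5", some "10 trav.", none, some "100 &agrave; 2000"]

def Spec_build_data_employees (tab : List (Option String)) (out : List String × List Int × Int) : Prop := out = build_data_employees_alt tab
instance (tab : List (Option String)) (out : List String × List Int × Int) : Decidable (Spec_build_data_employees tab out) := by unfold Spec_build_data_employees; infer_instance

-- ===== CLAIM (what is proved, stated in full; the proofs are below) =====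
def Claim_equal_build_data_employees : Prop := ∀ (tab : List (Option String)), Dom_build_data_employees tab → Pre_build_data_employees tab → Spec_build_data_employees tab (build_data_employees tab)

-- ===== LEMMAS AND PROOFS =====

def pvToList (P : PVCnt) : List Int := [P.p1, P.p2, P.p3, P.p4, P.p5, P.p6, P.p7, P.p8]

-- A's first loop produces exactly the preprocessed non-None rows, and counts them
theorem pvLoopA_eq (tab : List (Option String)) :
    ∀ acc c, tab.foldl pvStepA (acc, c) =
      (acc ++ (tab.filterMap id).map pvParts, c + ((tab.filterMap id).length : Int)) := by
  induction tab with
  | nil => intro acc c; simp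
  | cons e t ih =>
    intro acc c
    cases e with
    | none => simpa [pvStepA] using ih acc c
    | some s =>
      simp only [List.foldl_cons, pvStepA, id]
      rw [ih]
      simp [List.append_assoc]
      omega

-- the table lookup equals A's cascade, per row (B's step on a list state vs A's step on the 8 counters)
theorem pvStep_eq (s : String) (P : PVCnt) (c : Int) :
    pvStepB (pvToList P, c) (some s) = (pvToList (pvStep2 P (pvParts s)), c + 1) := by
  simp only [pvStepB, pvStep2]
  generalize pvParts s = row
  by_cases hl2 : row.length = 2
  · simp only [hl2, reduceIte]
    generalize (PySem.Int.ofStr? (row.getD 1 "")).getD 0 - (PySem.Int.ofStr? (row.getD 0 "")).getD 0 = diff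
    by_cases h1 : diff ≤ 5
    · simp [pvBounds, pvIncAt, pvToList, h1, show ¬((5:Int) < diff) by omega, show ¬((10:Int) < diff) by omega, show ¬((20:Int) < diff) by omega, show ¬((50:Int) < diff) by omega, show ¬((100:Int) < diff) by omega, show ¬((500:Int) < diff) by omega, show ¬((1000:Int) < diff) by omega]
    · by_cases h2 : diff ≤ 10
      · simp [pvBounds, pvIncAt, pvToList, h1, h2, show (5:Int) < diff by omega, show ¬((10:Int) < diff) by omega, show ¬((20:Int) < diff) by omega, show ¬((50:Int) < diff) by omega, show ¬((100:Int) < diff) by omega, show ¬((500:Int) < diff) by omega, show ¬((1000:Int) < diff) by omega, show (5:Int) ≤ diff by omega]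
      · by_cases h3 : diff ≤ 20
        · simp [pvBounds, pvIncAt, pvToList, h1, h2, h3, show (5:Int) < diff by omega, show (10:Int) < diff by omega, show ¬((20:Int) < diff) by omega, show ¬((50:Int) < diff) by omega, show ¬((100:Int) < diff) by omega, show ¬((500:Int) < diff) by omega, show ¬((1000:Int) < diff) by omega, show (10:Int) ≤ diff by omega]
        · by_cases h4 : diff ≤ 50
          · simp [pvBounds, pvIncAt, pvToList, h1, h2, h3, h4, show (5:Int) < diff by omega, show (10:Int) < diff by omega, show (20:Int) < diff by omega, show ¬((50:Int) < diff) by omega, show ¬((100:Int) < diff) by omega, show ¬((500:Int) < diff) by omega, show ¬((1000:Int) < diff) by omega, show (20:Int) ≤ diff by omega]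
          · by_cases h5 : diff ≤ 100
            · simp [pvBounds, pvIncAt, pvToList, h1, h2, h3, h4, h5, show (5:Int) < diff by omega, show (10:Int) < diff by omega, show (20:Int) < diff by omega, show (50:Int) < diff by omega, show ¬((100:Int) < diff) by omega, show ¬((500:Int) < diff) by omega, show ¬((1000:Int) < diff) by omega, show (50:Int) ≤ diff by omega]
            · by_cases h6 : diff ≤ 500
              · simp [pvBounds, pvIncAt, pvToList, h1, h2, h3, h4, h5, h6, show (5:Int) < diff by omega, show (10:Int) < diff by omega, show (20:Int) < diff by omega, show (50:Int) < diff by omega, show (100:Int) < diff by omega, show ¬((500:Int) < diff) by omega, show ¬((1000:Int) < diff) by omega, show (100:Int) ≤ diff by omega]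
              · by_cases h7 : diff ≤ 1000
                · simp [pvBounds, pvIncAt, pvToList, h1, h2, h3, h4, h5, h6, h7, show (5:Int) < diff by omega, show (10:Int) < diff by omega, show (20:Int) < diff by omega, show (50:Int) < diff by omega, show (100:Int) < diff by omega, show (500:Int) < diff by omega, show ¬((1000:Int) < diff) by omega, show (500:Int) ≤ diff by omega]
                · simp [pvBounds, pvToList, h1, h2, h3, h4, h5, h6, h7, show (5:Int) < diff by omega, show (10:Int) < diff by omega, show (20:Int) < diff by omega, show (50:Int) < diff by omega, show (100:Int) < diff by omega, show (500:Int) < diff by omega, show (1000:Int) < diff by omega]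
  · by_cases hl1 : row.length = 1
    · simp [hl1, pvIncAt, pvToList]
    · simp [hl2, hl1]

-- B's single loop computes A's second loop over the preprocessed rows, plus the count
theorem pvLoopB_eq (tab : List (Option String)) :
    ∀ (P : PVCnt) (c : Int), tab.foldl pvStepB (pvToList P, c) =
      (pvToList (((tab.filterMap id).map pvParts).foldl pvStep2 P), c + ((tab.filterMap id).length : Int)) := by
  induction tab with
  | nil => intro P c; simp
  | cons e t ih =>
    intro P c
    cases e with
    | none => simpa [pvStepB] using ih P c
    | some s =>
      simp only [List.foldl_cons, id]
      rw [pvStep_eq, ih]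
      simp
      omega

-- ===== VERDICT (by name: the statement is the Claim_ definition above) =====
theorem build_data_employees_spec : Claim_equal_build_data_employees := by
  unfold Claim_equal_build_data_employees
  intro tab _ _
  unfold Spec_build_data_employees build_data_employees build_data_employees_alt
  rw [pvLoopA_eq]
  have h := pvLoopB_eq tab ⟨0, 0, 0, 0, 0, 0, 0, 0⟩ 0
  simp only [pvToList] at h
  rw [h]
  simp
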